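-- pv_equiv track=rewrite | github.com/sinankabeer/automated-omr-evaluating-system | omr_core.py | score_answers
-- ===== SOURCE A (Python) =====
-- def score_answers(answers, answer_key):
--     per_subject = []
--     total = 0
--     # default: 5 subjects x 20 questions each
--     # if answer_key length != 100, compute subject sizes heuristically: 5 equal parts
--     n = len(answer_key)
--     subjects = 5
--     per_sub_count = n // subjects
--     for s in range(subjects):
--         start = s*per_sub_count
--         end = start + per_sub_count
--         correct = 0
--         for i in range(start, end):
--             det = answers[i]
--             correct_opt = answer_key[i]
--             if det !=0 and det == correct_opt:
--                 correct += 1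
--         per_subject.append(correct)
--         total += correct
--     return per_subject, total
-- ===== SOURCE B (Python) =====
-- def score_answers(answers, answer_key):
--     q = len(answer_key) // 5
--     pairs = list(zip(answers, answer_key))
--     per_subject = []
--     for _ in range(5):
--         head, pairs = pairs[:q], pairs[q:]
--         per_subject.append(sum(1 for det, key in head if det != 0 and det == key))
--     return per_subject, sum(per_subject)
-- ===== Notes on version B (the rewrite author's own statement) =====
-- stated objective: alternative
-- what changed: B zips answers with the key into one pair list and then repeatedly destructures it (head chunk / remainder) five times, counting hits in each chunk by a conditional generator-sum; there is no index arithmetic and no per-question indexing of the two arrays, unlike A's nested range loops over computed start/end indices.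
import Mathlib
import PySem

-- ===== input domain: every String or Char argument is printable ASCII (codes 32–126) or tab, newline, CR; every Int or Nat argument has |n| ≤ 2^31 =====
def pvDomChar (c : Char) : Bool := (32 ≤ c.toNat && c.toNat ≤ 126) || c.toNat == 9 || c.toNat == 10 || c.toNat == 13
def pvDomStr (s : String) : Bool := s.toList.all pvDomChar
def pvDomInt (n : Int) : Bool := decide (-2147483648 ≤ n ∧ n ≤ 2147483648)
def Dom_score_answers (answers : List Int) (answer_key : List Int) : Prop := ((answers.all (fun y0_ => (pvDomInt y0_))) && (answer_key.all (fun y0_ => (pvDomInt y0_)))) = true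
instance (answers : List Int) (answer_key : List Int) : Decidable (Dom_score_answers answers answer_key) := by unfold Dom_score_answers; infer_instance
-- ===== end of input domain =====

-- B zips answers with the key and splits the pair list head/rest five times, counting hits per
-- chunk, instead of A's nested index loops (objective: alternative decomposition; return value only).


-- ===== PORT A =====
def score_answers (answers : List Int) (answer_key : List Int) : List Int × Int :=
  let n : Int := answer_key.length
  let perSub : Int := PySem.Int.floordiv n 5
  let res := (PySem.List.pyRange 0 5 1).foldl (fun (st : List Int × Int) s =>
    let start := s * perSub
    let stop := start + perSub
    let correct := (PySem.List.pyRange start stop 1).foldl (fun c i =>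
      let det := PySem.List.pyGetD answers i 0      -- in range under Pre_
      let correct_opt := PySem.List.pyGetD answer_key i 0
      if det ≠ 0 ∧ det = correct_opt then c + 1 else c) 0
    (st.1 ++ [correct], st.2 + correct)) ([], 0)
  res

-- ===== PORT B =====
def score_answers_alt (answers : List Int) (answer_key : List Int) : List Int × Int :=
  let q : Int := PySem.Int.floordiv (answer_key.length : Int) 5
  let pairs := answers.zip answer_key
  let st := (PySem.List.pyRange 0 5 1).foldl (fun (st : List Int × List (Int × Int)) _ =>
    let head := PySem.List.slice st.2 none (some q)
    let rest := PySem.List.slice st.2 (some q) none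
    (st.1 ++ [head.foldl (fun c p => if p.1 ≠ 0 ∧ p.1 = p.2 then c + 1 else c) 0], rest))
    ([], pairs)
  (st.1, st.1.sum)

-- ===== PRECONDITION & SPEC =====
-- A indexes answers[i] for i < 5*(len(answer_key)//5); shorter `answers` makes A raise IndexError.
def Pre_score_answers (answers : List Int) (answer_key : List Int) : Prop :=
  5 * PySem.Int.floordiv (answer_key.length : Int) 5 ≤ (answers.length : Int)
instance (answers : List Int) (answer_key : List Int) : Decidable (Pre_score_answers answers answer_key) := by unfold Pre_score_answers; infer_instance

def pvWitness_score_answers : List Int × List Int := ([1, 2, 3, 4, 5], [1, 0, 3, 9, 5])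

def Spec_score_answers (answers : List Int) (answer_key : List Int) (out : List Int × Int) : Prop := out = score_answers_alt answers answer_key
instance (answers : List Int) (answer_key : List Int) (out : List Int × Int) : Decidable (Spec_score_answers answers answer_key out) := by unfold Spec_score_answers; infer_instance


-- ===== CLAIM (what is proved, stated in full; the proofs are below) =====
def Claim_equal_score_answers : Prop := ∀ (answers : List Int) (answer_key : List Int), Dom_score_answers answers answer_key → Pre_score_answers answers answer_key → Spec_score_answers answers answer_key (score_answers answers answer_key)

-- ===== LEMMAS AND PROOFS =====

-- B's per-chunk counting step, over a list of (detected, key) pairs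
def pvCnt (l : List (Int × Int)) : Int :=
  l.foldl (fun c p => if p.1 ≠ 0 ∧ p.1 = p.2 then c + 1 else c) 0

-- A's index loop over [a, a+b) counts exactly the hits in the corresponding zip chunk
lemma foldA_eq_cnt (answers answer_key : List Int) (b a : Nat)
    (ha : a + b ≤ answers.length) (hk : a + b ≤ answer_key.length) :
    (PySem.List.pyRange (a : Int) ((a : Int) + (b : Int)) 1).foldl (fun c i =>
      if PySem.List.pyGetD answers i 0 ≠ 0 ∧
         PySem.List.pyGetD answers i 0 = PySem.List.pyGetD answer_key i 0 then c + 1 else c) 0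
    = pvCnt (((answers.zip answer_key).drop a).take b) := by
  induction b with
  | zero =>
      simp [PySem.List.pyRange_one_eq_nil, pvCnt]
  | succ b ih =>
      have hsplit : PySem.List.pyRange (a : Int) ((a : Int) + ((b + 1 : Nat) : Int)) 1
          = PySem.List.pyRange (a : Int) ((a : Int) + (b : Int)) 1 ++ [(a : Int) + (b : Int)] := by
        have : ((a : Int) + ((b + 1 : Nat) : Int)) = ((a : Int) + (b : Int)) + 1 := by push_cast; ring
        rw [this, PySem.List.pyRange_one_succ_right (by omega)]
      have hab : a + b < answers.length := by omega
      have hkb : a + b < answer_key.length := by omega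
      have hz : a + b < (answers.zip answer_key).length := by
        rw [List.length_zip]; omega
      have hidx : ((a : Int) + (b : Int)) = ((a + b : Nat) : Int) := by push_cast; ring
      have hgA : PySem.List.pyGetD answers ((a : Int) + (b : Int)) 0 = answers[a + b] := by
        rw [hidx, PySem.List.pyGetD_natCast, List.getD_eq_getElem _ _ hab]
      have hgK : PySem.List.pyGetD answer_key ((a : Int) + (b : Int)) 0 = answer_key[a + b] := by
        rw [hidx, PySem.List.pyGetD_natCast, List.getD_eq_getElem _ _ hkb]
      have htake : ((answers.zip answer_key).drop a).take (b + 1)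
          = ((answers.zip answer_key).drop a).take b ++ [(answers[a + b], answer_key[a + b])] := by
        have hlen : b < ((answers.zip answer_key).drop a).length := by
          rw [List.length_drop, List.length_zip]; omega
        rw [List.take_add_one, List.getElem?_eq_getElem hlen]
        congr 1
        simp [List.getElem_drop, List.getElem_zip]
      rw [hsplit, List.foldl_append, htake]
      unfold pvCnt
      rw [List.foldl_append]
      simp only [List.foldl_cons, List.foldl_nil, hgA, hgK]
      rw [ih (by omega) (by omega)]
      simp [pvCnt]

-- ===== VERDICT (by name: the statement is the Claim_ definition above) =====
theorem score_answers_spec : Claim_equal_score_answers := by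
  intro answers answer_key _ hpre
  unfold Spec_score_answers score_answers score_answers_alt
  have hq : PySem.Int.floordiv (answer_key.length : Int) 5 = ((answer_key.length / 5 : Nat) : Int) := by
    rw [PySem.Int.floordiv_eq_ediv_of_pos (by norm_num)]
    exact Eq.symm (Nat.ToInt.div_congr rfl rfl)
  have hrange5 : PySem.List.pyRange 0 5 1 = [0, 1, 2, 3, 4] := by decide
  rw [hrange5]
  simp only [List.foldl_cons, List.foldl_nil]
  rw [hq]
  set q : Nat := answer_key.length / 5 with hqdef
  have hqk : 5 * q ≤ answer_key.length := by
    have := Nat.div_mul_le_self answer_key.length 5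
    omega
  have hqa : 5 * q ≤ answers.length := by
    unfold Pre_score_answers at hpre
    rw [hq] at hpre
    exact_mod_cast hpre
  -- reduce B's slices to take/drop
  have hslice_to : ∀ (l : List (Int × Int)), PySem.List.slice l none (some (q : Int)) = l.take q :=
    fun l => PySem.List.slice_to_natCast l q
  have hslice_from : ∀ (l : List (Int × Int)), PySem.List.slice l (some (q : Int)) none = l.drop q :=
    fun l => PySem.List.slice_from_natCast l q
  simp only [hslice_to, hslice_from, List.drop_drop]
  -- instantiate the chunk lemma for the five subjects
  have h0 := foldA_eq_cnt answers answer_key q 0 (by omega) (by omega)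
  have h1 := foldA_eq_cnt answers answer_key q q (by omega) (by omega)
  have h2 := foldA_eq_cnt answers answer_key q (2 * q) (by omega) (by omega)
  have h3 := foldA_eq_cnt answers answer_key q (3 * q) (by omega) (by omega)
  have h4 := foldA_eq_cnt answers answer_key q (4 * q) (by omega) (by omega)
  unfold pvCnt at h0 h1 h2 h3 h4
  simp only [List.drop_zero] at h0
  have e0 : (0 : Int) * (q : Int) = ((0 : Nat) : Int) := by simp
  have e1 : (1 : Int) * (q : Int) = ((q : Nat) : Int) := by push_cast; ring
  have e2 : (2 : Int) * (q : Int) = ((2 * q : Nat) : Int) := by push_cast; ring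
  have e3 : (3 : Int) * (q : Int) = ((3 * q : Nat) : Int) := by push_cast; ring
  have e4 : (4 : Int) * (q : Int) = ((4 * q : Nat) : Int) := by push_cast; ring
  rw [e0, e1, e2, e3, e4, h0, h1, h2, h3, h4]
  have d1 : q + q = 2 * q := by ring
  have d2 : 2 * q + q = 3 * q := by ring
  have d3 : 3 * q + q = 4 * q := by ring
  simp only [d1, d2, d3]
  rw [Prod.mk.injEq]
  constructor
  · simp
  · simp
    ring
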